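-- pv_equiv track=rewrite | github.com/paleyde/py-ass-test-util | profile-model/media/student_submission/AdditionGame.py | getMaximumPoints
-- ===== SOURCE A (Python) =====
-- def getMaximumPoints(A, B, C, N):
--     blackboard_numbers = (A,B,C)
--     points = 0
--     if ((1 <= N <= 150) and (1 <= A <= 50) and (1 <= B <= 50) and (1 <= C <= 50)):
--         for i in range(0,N):
--             sorted_blackboard_numbers = sorted(blackboard_numbers)
--             max_sorted_blackboard_numbers = max(sorted_blackboard_numbers)
--             points = points + max_sorted_blackboard_numbers
--             blackboard_numbers = (sorted_blackboard_numbers[0] , sorted_blackboard_numbers[1] , sorted_blackboard_numbers[2] -1)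
--             if blackboard_numbers==(0,0,0):
--                 return points
--             else:
--                 continue
--     return (points)
-- ===== SOURCE B (Python) =====
-- def getMaximumPoints(A, B, C, N):
--     points = 0
--     if ((1 <= N <= 150) and (1 <= A <= 50) and (1 <= B <= 50) and (1 <= C <= 50)):
--         n = N
--         v = max(A, B, C)
--         while n > 0 and v > 0:
--             k = (v <= A) + (v <= B) + (v <= C)
--             take = min(k, n)
--             points += take * v
--             n -= take
--             v -= 1
--     return points
-- ===== Notes on version B (the rewrite author's own statement) =====
-- stated objective: alternative
-- what changed: Replaces A's per-iteration simulation (sort the triple, add its max, decrement it, up to N times) with a single level-wise sweep from the top height downwards that counts how many of the three numbers reach each height and adds whole levels at once.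
import Mathlib
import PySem

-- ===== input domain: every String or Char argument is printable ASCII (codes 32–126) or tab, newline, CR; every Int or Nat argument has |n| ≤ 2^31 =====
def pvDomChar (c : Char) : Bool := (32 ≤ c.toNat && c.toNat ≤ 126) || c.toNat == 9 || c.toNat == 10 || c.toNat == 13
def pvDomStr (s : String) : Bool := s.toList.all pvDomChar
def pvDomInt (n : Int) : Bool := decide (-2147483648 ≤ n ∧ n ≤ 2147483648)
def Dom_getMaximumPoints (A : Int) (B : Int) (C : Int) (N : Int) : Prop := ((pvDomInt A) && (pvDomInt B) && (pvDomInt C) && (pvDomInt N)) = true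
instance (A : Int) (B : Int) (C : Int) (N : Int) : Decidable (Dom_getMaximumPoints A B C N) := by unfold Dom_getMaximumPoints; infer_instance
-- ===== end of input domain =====

-- B replaces A's per-step simulation (sort + take max, N iterations) by a level-wise sweep
-- from the top height downwards, counting how many numbers reach each height (objective: alternative).

-- ===== PORT A =====
-- the for-loop of A: fuel = remaining iterations, state = (triple, points); early return inside
def gmpLoopA : Nat → Int × Int × Int → Int → Int
  | 0, _, pts => pts
  | Nat.succ n, t, pts =>
      let s := PySem.List.sorted [t.1, t.2.1, t.2.2] (fun x => x) false
      let m := (PySem.List.max? s (fun x => x)).getD 0   -- list has length 3, so max? is some _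
      let pts' := pts + m
      let t' : Int × Int × Int :=
        ((PySem.List.pyGet? s 0).getD 0, (PySem.List.pyGet? s 1).getD 0, (PySem.List.pyGet? s 2).getD 0 - 1)  -- indices 0,1,2 in range
      if t' = (0, 0, 0) then pts' else gmpLoopA n t' pts'

def getMaximumPoints (A : Int) (B : Int) (C : Int) (N : Int) : Int :=
  if (1 ≤ N ∧ N ≤ 150) ∧ (1 ≤ A ∧ A ≤ 50) ∧ (1 ≤ B ∧ B ≤ 50) ∧ (1 ≤ C ∧ C ≤ 50) then
    gmpLoopA N.toNat (A, B, C) 0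
  else 0

-- ===== PORT B =====
-- the while-loop of B: state = (points, n, v), sweeping v downwards
def gmpLoopB (A B C : Int) (pts n v : Int) : Int :=
  if 0 < n ∧ 0 < v then
    let k : Int := (if v ≤ A then 1 else 0) + (if v ≤ B then 1 else 0) + (if v ≤ C then 1 else 0)
    let take := min k n
    gmpLoopB A B C (pts + take * v) (n - take) (v - 1)
  else pts
termination_by v.toNat
decreasing_by omega

def getMaximumPoints_alt (A : Int) (B : Int) (C : Int) (N : Int) : Int :=
  if (1 ≤ N ∧ N ≤ 150) ∧ (1 ≤ A ∧ A ≤ 50) ∧ (1 ≤ B ∧ B ≤ 50) ∧ (1 ≤ C ∧ C ≤ 50) then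
    gmpLoopB A B C 0 N (max A (max B C))
  else 0

-- ===== PRECONDITION & SPEC =====
def Spec_getMaximumPoints (A : Int) (B : Int) (C : Int) (N : Int) (out : Int) : Prop := out = getMaximumPoints_alt A B C N
instance (A : Int) (B : Int) (C : Int) (N : Int) (out : Int) : Decidable (Spec_getMaximumPoints A B C N out) := by unfold Spec_getMaximumPoints; infer_instance

-- ===== CLAIM (what is proved, stated in full; the proofs are below) =====
def Claim_equal_getMaximumPoints : Prop := ∀ (A : Int) (B : Int) (C : Int) (N : Int), Dom_getMaximumPoints A B C N → Spec_getMaximumPoints A B C N (getMaximumPoints A B C N)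

-- ===== LEMMAS AND PROOFS =====

-- number of elements of L that are ≥ v
def gmpCnt (L : List Int) (v : Int) : Int := (L.countP (fun x => decide (v ≤ x)) : Nat)

-- level-wise sum, abstract form of B's loop over an arbitrary list
def gmpS (L : List Int) (n v : Int) : Int :=
  if 0 < n ∧ 0 < v then
    min (gmpCnt L v) n * v + gmpS L (n - min (gmpCnt L v) n) (v - 1)
  else 0
termination_by v.toNat
decreasing_by omega

theorem gmpCnt_triple (a b c v : Int) :
    gmpCnt [a, b, c] v = (if v ≤ a then 1 else 0) + (if v ≤ b then 1 else 0) + (if v ≤ c then 1 else 0) := by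
  simp [gmpCnt, List.countP_cons]
  split_ifs <;> simp_all

theorem gmpLoopB_eq_gmpS (A B C pts n v : Int) :
    gmpLoopB A B C pts n v = pts + gmpS [A, B, C] n v := by
  fun_induction gmpLoopB with
  | case1 pts n v h k take ih =>
      rw [ih]
      conv_rhs => rw [gmpS]
      simp only [if_pos h, gmpCnt_triple, k, take, dite_eq_ite]
      ring
  | case2 pts n v h =>
      rw [gmpS]
      simp [h]

theorem gmpS_n_nonpos (L : List Int) (n v : Int) (h : ¬ 0 < n) : gmpS L n v = 0 := by
  rw [gmpS]
  simp [h]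

theorem gmpS_congr (L L' : List Int) (n v : Int)
    (h : ∀ w, 0 < w → w ≤ v → gmpCnt L w = gmpCnt L' w) :
    gmpS L n v = gmpS L' n v := by
  by_cases hv : 0 < v
  · rw [gmpS]
    conv_rhs => rw [gmpS]
    by_cases hn : 0 < n
    · simp only [if_pos (And.intro hn hv)]
      rw [h v hv le_rfl,
        gmpS_congr L L' (n - min (gmpCnt L' v) n) (v - 1) (fun w hw hwv => h w hw (by omega))]
    · simp [hn]
  · rw [gmpS]
    conv_rhs => rw [gmpS]
    simp [hv]
termination_by v.toNat
decreasing_by omega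

theorem gmpS_zero (L : List Int) (n v : Int) (h : ∀ w, 0 < w → gmpCnt L w = 0) :
    gmpS L n v = 0 := by
  by_cases hv : 0 < v
  · rw [gmpS]
    by_cases hn : 0 < n
    · simp only [if_pos (And.intro hn hv), h v hv]
      have hm : min (0 : Int) n = 0 := by omega
      rw [hm]
      simpa using gmpS_zero L n (v - 1) h
    · simp [hn]
  · rw [gmpS]; simp [hv]
termination_by v.toNat
decreasing_by omega

theorem gmpS_drop (L : List Int) (n v : Int) (h : gmpCnt L v = 0) :
    gmpS L n v = gmpS L n (v - 1) := by
  by_cases hn : 0 < n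
  · by_cases hv : 0 < v
    · rw [gmpS]
      simp only [if_pos (And.intro hn hv), h]
      have hm : min (0 : Int) n = 0 := by omega
      rw [hm]
      simp
    · rw [gmpS]
      conv_rhs => rw [gmpS]
      rw [if_neg (by omega : ¬ (0 < n ∧ 0 < v)), if_neg (by omega : ¬ (0 < n ∧ 0 < v - 1))]
  · rw [gmpS_n_nonpos _ _ _ hn, gmpS_n_nonpos _ _ _ hn]

theorem gmpS_step (x y z n : Int) (_hxy : x ≤ y) (_hyz : y ≤ z) (hz : 0 < z) (hn : 0 < n) :
    gmpS [x, y, z] n z = z + gmpS [x, y, z - 1] (n - 1) z := by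
  have hcongr : ∀ m : Int, gmpS [x, y, z] m (z - 1) = gmpS [x, y, z - 1] m (z - 1) := by
    intro m
    refine gmpS_congr _ _ _ _ (fun w hw hwv => ?_)
    rw [gmpCnt_triple, gmpCnt_triple]
    have h1 : w ≤ z := by omega
    have h2 : w ≤ z - 1 := by omega
    simp [h1, h2]
  have hzz : ¬ (z ≤ z - 1) := by omega
  rw [gmpS]
  conv_rhs => rw [gmpS]
  rw [if_pos (And.intro hn hz)]
  simp only [gmpCnt_triple, le_refl, if_pos, if_neg hzz, add_zero]
  set a : Int := if z ≤ x then 1 else 0 with ha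
  set b : Int := if z ≤ y then 1 else 0 with hb
  have ha01 : 0 ≤ a ∧ a ≤ 1 := by rw [ha]; split_ifs <;> simp
  have hb01 : 0 ≤ b ∧ b ≤ 1 := by rw [hb]; split_ifs <;> simp
  by_cases hn1 : 0 < n - 1
  · rw [if_pos (And.intro hn1 hz), hcongr]
    have e1 : min (a + b + 1) n = min (a + b) (n - 1) + 1 := by omega
    have e2 : n - min (a + b + 1) n = n - 1 - min (a + b) (n - 1) := by omega
    rw [e2, e1]
    ring
  · rw [if_neg (by omega : ¬ (0 < n - 1 ∧ 0 < z))]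
    have e1 : min (a + b + 1) n = 1 := by omega
    rw [e1, gmpS_n_nonpos _ _ _ hn1]
    ring

theorem gmpLoopA_eq (n : Nat) (a b c pts : Int) (ha : 0 ≤ a) (hb : 0 ≤ b) (hc : 0 ≤ c)
    (hnz : ¬(a = 0 ∧ b = 0 ∧ c = 0)) :
    gmpLoopA n (a, b, c) pts = pts + gmpS [a, b, c] (n : Int) (max a (max b c)) := by
  induction n generalizing a b c pts with
  | zero =>
      rw [gmpS_n_nonpos _ _ _ (by simp)]
      simp [gmpLoopA]
  | succ n ih =>
      have hperm := PySem.List.sorted_perm [a, b, c] (fun x : Int => x) false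
      have hpw := PySem.List.sorted_pairwise [a, b, c] (fun x : Int => x)
      have hlen : (PySem.List.sorted [a, b, c] (fun x : Int => x) false).length = 3 := by
        rw [hperm.length_eq]; rfl
      obtain ⟨x, y, z, hs⟩ := List.length_eq_three.mp hlen
      rw [hs] at hperm hpw
      simp only [List.pairwise_cons, List.mem_cons] at hpw
      have hxy : x ≤ y := by
        have := hpw.1 y; simp at this; exact this
      have hyz : y ≤ z := by
        have := hpw.2.1 z; simp at this; exact this
      have hxz : x ≤ z := le_trans hxy hyz
      have hxm : x = a ∨ x = b ∨ x = c := by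
        have := hperm.mem_iff.mp (show x ∈ [x, y, z] by simp); simpa using this
      have hym : y = a ∨ y = b ∨ y = c := by
        have := hperm.mem_iff.mp (show y ∈ [x, y, z] by simp); simpa using this
      have hzm : z = a ∨ z = b ∨ z = c := by
        have := hperm.mem_iff.mp (show z ∈ [x, y, z] by simp); simpa using this
      have ham : a = x ∨ a = y ∨ a = z := by
        have := hperm.mem_iff.mpr (show a ∈ [a, b, c] by simp); simpa using this
      have hbm : b = x ∨ b = y ∨ b = z := by
        have := hperm.mem_iff.mpr (show b ∈ [a, b, c] by simp); simpa using this
      have hcm : c = x ∨ c = y ∨ c = z := by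
        have := hperm.mem_iff.mpr (show c ∈ [a, b, c] by simp); simpa using this
      have haz : a ≤ z := by rcases ham with h | h | h <;> omega
      have hbz : b ≤ z := by rcases hbm with h | h | h <;> omega
      have hcz : c ≤ z := by rcases hcm with h | h | h <;> omega
      have hx0 : 0 ≤ x := by rcases hxm with h | h | h <;> omega
      have hy0 : 0 ≤ y := by rcases hym with h | h | h <;> omega
      have hmax : max a (max b c) = z := by rcases hzm with h | h | h <;> omega
      have hz1 : 0 < z := by
        rcases hzm with h | h | h <;> rcases ham with h1 | h1 | h1 <;>
          rcases hbm with h2 | h2 | h2 <;> rcases hcm with h3 | h3 | h3 <;> omega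
      have hSperm : ∀ m v : Int, gmpS [a, b, c] m v = gmpS [x, y, z] m v := fun m v =>
        gmpS_congr _ _ _ _ (fun w _ _ => by
          simp only [gmpCnt, hperm.countP_eq])
      simp only [gmpLoopA, hs]
      rw [PySem.List.max?_id_cons]
      have hm : List.foldl max x [y, z] = z := by
        simp only [List.foldl]
        omega
      rw [hm]
      simp only [Option.getD_some]
      have g0 : (PySem.List.pyGet? [x, y, z] 0).getD 0 = x := by
        simp [PySem.List.pyGet?, PySem.List.pyIdx?]
      have g1 : (PySem.List.pyGet? [x, y, z] 1).getD 0 = y := by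
        simp [PySem.List.pyGet?, PySem.List.pyIdx?]
      have g2 : (PySem.List.pyGet? [x, y, z] 2).getD 0 = z := by
        simp [PySem.List.pyGet?, PySem.List.pyIdx?]
      rw [g0, g1, g2, hmax, hSperm]
      have hcast : (((n + 1 : Nat)) : Int) = (n : Int) + 1 := by push_cast; ring
      rw [hcast, gmpS_step x y z ((n : Int) + 1) hxy hyz hz1 (by positivity)]
      have e : ((n : Int) + 1) - 1 = (n : Int) := by ring
      rw [e]
      split_ifs with h0
      · obtain ⟨hx, hy, hz⟩ : x = 0 ∧ y = 0 ∧ z - 1 = 0 := by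
          simpa [Prod.ext_iff] using h0
        have hz' : z = 1 := by omega
        subst hx hy hz'
        rw [gmpS_zero _ _ _ (fun w hw => by
          rw [gmpCnt_triple]
          have h1 : ¬ w ≤ (0 : Int) := by omega
          have h2 : ¬ w ≤ (1 : Int) - 1 := by omega
          simp [h1])]
        ring
      · have hnz' : ¬(x = 0 ∧ y = 0 ∧ z - 1 = 0) := by
          intro hcon
          exact h0 (by simp [hcon.1, hcon.2.1, hcon.2.2])
        rw [ih x y (z - 1) (pts + z) hx0 hy0 (by omega) hnz']
        by_cases hyz2 : y = z
        · have hM : max x (max y (z - 1)) = z := by omega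
          rw [hM]
          ring
        · have hcnt0 : gmpCnt [x, y, z - 1] z = 0 := by
            rw [gmpCnt_triple]
            have h1 : ¬ z ≤ x := by omega
            have h2 : ¬ z ≤ y := by omega
            have h3 : ¬ z ≤ z - 1 := by omega
            simp [h1, h2, h3]
          rw [gmpS_drop _ _ _ hcnt0]
          have hM : max x (max y (z - 1)) = z - 1 := by omega
          rw [hM]
          ring

-- ===== VERDICT (by name: the statement is the Claim_ definition above) =====
theorem getMaximumPoints_spec : Claim_equal_getMaximumPoints := by
  intro A B C N _
  unfold Spec_getMaximumPoints getMaximumPoints getMaximumPoints_alt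
  split
  · rename_i h
    obtain ⟨⟨hN1, _⟩, ⟨hA1, _⟩, ⟨hB1, _⟩, ⟨hC1, _⟩⟩ := h
    rw [gmpLoopA_eq _ _ _ _ _ (by omega) (by omega) (by omega) (by omega),
      gmpLoopB_eq_gmpS]
    have : ((N.toNat : Int)) = N := by omega
    rw [this]
  · rfl
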